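-- pv_equiv track=rewrite | github.com/yxngles13/3110PythonNumericalLiteralChecker | octint.py | is_octint
-- ===== SOURCE A (Python) =====
-- def is_octint(s):
--
--     ##if the length of input string is 0, return False
--     if len(s) == 0:
--         return False
--     state = 'q1'
--
--     ##loop through each character in the string
--     for char in s:
--
--         if state == 'q1':
--             #first state must be 0
--             if char == '0':
--                 state = 'q2'
--             else:
--                 return False
--
--         elif state == 'q2':
--             #second state must be 'o' or 'O'
--             if char == 'o' or char == 'O':
--                 state = 'q3'
--             else:
--                 return False
--
--         elif state == 'q3':
--             ##fourth state: check if character is a digit 0-7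
--             if '0' <= char <= '7':
--                 state = 'q3'
--             ##check if character is underscore, if so transition to q5
--             elif char =='_':
--                 state = 'q4'
--             else:
--                 return False
--
--         elif state == 'q4':
--             ## after underscore, must have digit 0-7, transition back to q4
--             if '0' <= char <= '7':
--                 state = 'q3'
--             else:
--                 return False
--
--     ##if we end in state q4, return True
--     if state == 'q3':
--         return True
--     else:
--         return False
-- ===== SOURCE B (Python) =====
-- def is_octint(s):
--     # Declarative check: '0o'/'0O' prefix, then a nonempty body of octal digits
--     # and underscores with no doubled underscore and no trailing underscore.
--     if len(s) < 3 or s[0] != '0' or s[1] not in 'oO':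
--         return False
--     body = s[2:]
--     return (all(c in '01234567_' for c in body)
--             and '__' not in body
--             and not body.endswith('_'))
-- ===== Notes on version B (the rewrite author's own statement) =====
-- stated objective: simpler
-- what changed: Replaced the four-state machine loop with a prefix check plus three declarative conditions on the body (all chars octal-or-underscore, no '__' substring, no trailing underscore).
-- intended difference: On exactly the two inputs '0o' and '0O' A returns True although the literal has no digits; B returns False, which is the intended behaviour since Python itself rejects '0o' as an octal literal. — e.g. on is_octint("0o"): A returns true, B returns false
import Mathlib
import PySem

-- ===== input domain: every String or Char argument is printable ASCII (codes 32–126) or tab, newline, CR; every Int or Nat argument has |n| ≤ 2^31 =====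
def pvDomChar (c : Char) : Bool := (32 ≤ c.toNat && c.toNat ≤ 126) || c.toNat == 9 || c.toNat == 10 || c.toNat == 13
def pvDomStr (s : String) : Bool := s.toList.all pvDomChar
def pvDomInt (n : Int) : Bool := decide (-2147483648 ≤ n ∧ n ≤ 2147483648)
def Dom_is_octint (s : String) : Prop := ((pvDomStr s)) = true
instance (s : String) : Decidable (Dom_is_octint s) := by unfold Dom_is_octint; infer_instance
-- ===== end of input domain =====

-- B replaces A's four-state loop by a prefix check plus three declarative
-- body conditions (simpler); on '0o'/'0O' alone B returns False where A returns True (D_ below).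


-- ===== PORT A =====
inductive OctSt | q1 | q2 | q3 | q4
deriving DecidableEq, Repr

-- the for-loop with its early `return False`s, step for step
def octLoop : OctSt → List Char → Bool
  | st, [] => st = .q3
  | .q1, c :: t => if c = '0' then octLoop .q2 t else false
  | .q2, c :: t => if c = 'o' ∨ c = 'O' then octLoop .q3 t else false
  | .q3, c :: t =>
      if '0' ≤ c ∧ c ≤ '7' then octLoop .q3 t
      else if c = '_' then octLoop .q4 t
      else false
  | .q4, c :: t => if '0' ≤ c ∧ c ≤ '7' then octLoop .q3 t else false

def is_octint (s : String) : Bool :=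
  if s.toList.length = 0 then false
  else octLoop .q1 s.toList

-- ===== PORT B =====
def is_octint_alt (s : String) : Bool :=
  let l := s.toList
  if l.length < 3 ∨ PySem.List.pyGetD l 0 ' ' ≠ '0'
      ∨ ¬ PySem.Chars.isIn [PySem.List.pyGetD l 1 ' '] ['o','O'] then
    false
  else
    let body := PySem.List.slice l (some 2) none
    body.all (fun c => PySem.Chars.isIn [c] ['0','1','2','3','4','5','6','7','_'])
      && !PySem.Chars.isIn ['_', '_'] body
      && !PySem.Chars.endswith body ['_']

-- ===== PRECONDITION & SPEC =====
-- On exactly '0o' and '0O' A returns True though the literal has no digits; B returns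
-- False, the intended behaviour (Python itself rejects '0o' as an octal literal).
def D_is_octint (s : String) : Prop := s = "0o" ∨ s = "0O"
instance (s : String) : Decidable (D_is_octint s) := by unfold D_is_octint; infer_instance

def Spec_is_octint (s : String) (out : Bool) : Prop := ¬ D_is_octint s → out = is_octint_alt s
instance (s : String) (out : Bool) : Decidable (Spec_is_octint s out) := by unfold Spec_is_octint; infer_instance

def pvDiffWitness_is_octint : String := "0o"
def pvDiffWitnessOut_is_octint : Bool × Bool := (true, false)

-- ===== CLAIM (what is proved, stated in full; the proofs are below) =====
def Claim_unchanged_is_octint : Prop := ∀ (s : String), Dom_is_octint s → Spec_is_octint s (is_octint s)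
def Claim_changed_is_octint : Prop := Dom_is_octint (pvDiffWitness_is_octint) ∧ D_is_octint (pvDiffWitness_is_octint) ∧ is_octint (pvDiffWitness_is_octint) = pvDiffWitnessOut_is_octint.1 ∧ is_octint_alt (pvDiffWitness_is_octint) = pvDiffWitnessOut_is_octint.2 ∧ pvDiffWitnessOut_is_octint.1 ≠ pvDiffWitnessOut_is_octint.2
def Claim_exact_is_octint : Prop := ∀ (s : String), Dom_is_octint s → D_is_octint s → is_octint s ≠ is_octint_alt s


-- ===== LEMMAS AND PROOFS =====
-- character-class booleans used to characterise both programs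
def octB (c : Char) : Bool := decide ('0' ≤ c ∧ c ≤ '7')
def octuB (c : Char) : Bool := octB c || c == '_'

-- "body contains '__'" and "body ends with '_'", as structural recursions
def ddB : List Char → Bool
  | [] => false
  | c :: t => (c == '_' && t.head? == some '_') || ddB t

def ewB : List Char → Bool
  | [] => false
  | [c] => c == '_'
  | _ :: d :: t => ewB (d :: t)

theorem charToNat_inj (c d : Char) : c.toNat = d.toNat ↔ c = d := eq_iff_eq_of_cmp_eq_cmp rfl

theorem char_le_toNat (c d : Char) : (c ≤ d) ↔ (c.toNat ≤ d.toNat) := by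
  rw [Char.le_def, UInt32.le_iff_toNat_le]; rfl

theorem mem_oct (c : Char) : c ∈ (['0','1','2','3','4','5','6','7'] : List Char) ↔ ('0' ≤ c ∧ c ≤ '7') := by
  rw [char_le_toNat, char_le_toNat]
  show _ ↔ 48 ≤ c.toNat ∧ c.toNat ≤ 55
  simp only [List.mem_cons, List.not_mem_nil, or_false, ← charToNat_inj]
  show c.toNat = 48 ∨ c.toNat = 49 ∨ c.toNat = 50 ∨ c.toNat = 51 ∨ c.toNat = 52 ∨ c.toNat = 53 ∨ c.toNat = 54 ∨ c.toNat = 55 ↔ _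
  omega

theorem octB_ne_underscore (c : Char) (h : octB c = true) : c ≠ '_' := by
  intro h2; subst h2; simp [octB, char_le_toNat] at h

theorem isIn_single (c : Char) (l : List Char) : PySem.Chars.isIn [c] l = true ↔ c ∈ l := by
  rw [PySem.Chars.isIn_iff_infix, List.singleton_infix_iff]

theorem isIn_octu (c : Char) :
    PySem.Chars.isIn [c] (['0','1','2','3','4','5','6','7','_'] : List Char) = octuB c := by
  rw [Bool.eq_iff_iff, isIn_single]
  have h8 : (['0','1','2','3','4','5','6','7','_'] : List Char)
      = ['0','1','2','3','4','5','6','7'] ++ ['_'] := rfl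
  rw [h8, List.mem_append, mem_oct]
  simp [octuB, octB]

theorem isIn_dd (l : List Char) : PySem.Chars.isIn ['_','_'] l = ddB l := by
  rw [Bool.eq_iff_iff, PySem.Chars.isIn_iff_infix]
  induction l with
  | nil => simp [ddB]
  | cons c t ih =>
    rw [List.infix_cons_iff]
    cases t with
    | nil =>
      simp [ddB, List.cons_prefix_cons]
    | cons d t' =>
      simp only [ddB, List.cons_prefix_cons, List.head?_cons, ih, List.nil_prefix, and_true,
        Bool.or_eq_true, Bool.and_eq_true, beq_iff_eq, Option.some.injEq]
      constructor
      · rintro (⟨h1, h2⟩ | h)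
        · exact Or.inl ⟨h1.symm, h2.symm⟩
        · exact Or.inr h
      · rintro (⟨h1, h2⟩ | h)
        · exact Or.inl ⟨h1.symm, h2.symm⟩
        · exact Or.inr h

theorem ends_ew (l : List Char) : PySem.Chars.endswith l ['_'] = ewB l := by
  rw [Bool.eq_iff_iff, PySem.Chars.endswith_iff]
  induction l with
  | nil => simp [ewB]
  | cons c t ih =>
    rw [List.suffix_cons_iff]
    cases t with
    | nil =>
      simp only [ewB, beq_iff_eq]
      constructor
      · rintro (h | h)
        · injection h with h1 _; exact h1.symm
        · simp at h
      · rintro rfl; exact Or.inl rfl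
    | cons d t' =>
      simp only [ewB, ih]
      simp

-- the single characterisation of A's state machine from states q3/q4
theorem octLoop_char (l : List Char) :
    (octLoop .q3 l = (l.all octuB && !ddB l && !ewB l)) ∧
    (octLoop .q4 l = ((match l with | [] => false | c :: _ => octB c) && (l.all octuB && !ddB l && !ewB l))) := by
  induction l with
  | nil => exact ⟨rfl, rfl⟩
  | cons c t ih =>
    obtain ⟨ih3, ih4⟩ := ih
    have key : ∀ (h1 : '0' ≤ c ∧ c ≤ '7'),
        octLoop .q3 t = ((c :: t).all octuB && !ddB (c :: t) && !ewB (c :: t)) := by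
      intro h1
      have hoct : octB c = true := by simp [octB, h1]
      have hc : (c == '_') = false := by simp [octB_ne_underscore c hoct]
      cases t with
      | nil => simp [ddB, ewB, octLoop, octuB, hoct, hc]
      | cons d t' =>
        rw [ih3]
        simp [ddB, ewB, octuB, hoct, hc]
    constructor
    · show (if '0' ≤ c ∧ c ≤ '7' then octLoop .q3 t
            else if c = '_' then octLoop .q4 t else false) = _
      by_cases h1 : '0' ≤ c ∧ c ≤ '7'
      · rw [if_pos h1]; exact key h1
      · rw [if_neg h1]
        by_cases h2 : c = '_'
        · subst h2
          rw [if_pos rfl, ih4]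
          have hu : octB '_' = false := by decide
          cases t with
          | nil => simp [ddB, ewB]
          | cons d t' =>
            by_cases hd : d = '_'
            · subst hd
              simp [ddB, ewB, hu]
            · have hdc : (d == '_') = false := by simp [hd]
              cases hoctd : octB d <;>
                simp [ddB, ewB, octuB, hdc, hoctd]
        · have hoct : octB c = false := by
            simp only [octB, decide_eq_false_iff_not]; exact h1
          rw [if_neg h2]
          simp [octuB, hoct, h2]
    · show (if '0' ≤ c ∧ c ≤ '7' then octLoop .q3 t else false) = _
      by_cases h1 : '0' ≤ c ∧ c ≤ '7'
      · have hoct : octB c = true := by simp [octB, h1]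
        rw [if_pos h1, key h1]
        simp [hoct]
      · have hoct : octB c = false := by
          simp only [octB, decide_eq_false_iff_not]; exact h1
        rw [if_neg h1]
        simp [hoct]

-- reduction of port B on a string of length ≥ 3
theorem alt_eq (s : String) (c0 c1 : Char) (body : List Char) (hl : s.toList = c0 :: c1 :: body)
    (hb : body ≠ []) :
    is_octint_alt s =
      (decide (c0 = '0') && decide (c1 = 'o' ∨ c1 = 'O')
        && (body.all octuB && !ddB body && !ewB body)) := by
  have hlen : 3 ≤ s.length := by
    rw [← String.length_toList, hl]
    cases body with
    | nil => exact absurd rfl hb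
    | cons _ _ => simp
  have hget0 : PySem.List.pyGetD s.toList 0 ' ' = c0 := by rw [hl]; simp [pysem]
  have hget1 : PySem.List.pyGetD s.toList 1 ' ' = c1 := by rw [hl]; simp [pysem]
  have hslice : PySem.List.slice s.toList (some 2) (none : Option Int) = body := by
    rw [hl]; simp [pysem]
  have hisin : PySem.Chars.isIn [c1] ['o', 'O'] = decide (c1 = 'o' ∨ c1 = 'O') := by
    rw [Bool.eq_iff_iff, isIn_single]; simp
  unfold is_octint_alt
  simp only [hget0, hget1, hslice, hisin, isIn_octu, isIn_dd, ends_ew]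
  by_cases h0 : c0 = '0'
  · by_cases h1 : c1 = 'o' ∨ c1 = 'O'
    · rw [if_neg (by simp [h0, h1]; omega)]
      simp [h0, h1]
    · rw [if_pos (by simp [h1])]
      simp [h1]
  · rw [if_pos (by simp [h0])]
    simp [h0]

-- ===== VERDICT (by name: the statement is the Claim_ definition above) =====
theorem is_octint_spec : Claim_unchanged_is_octint := by
  intro s _ hD
  show is_octint s = is_octint_alt s
  cases hl : s.toList with
  | nil => simp [is_octint, is_octint_alt, hl]
  | cons c0 t0 =>
    cases t0 with
    | nil =>
      simp only [is_octint, is_octint_alt, hl]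
      simp [octLoop]
    | cons c1 t1 =>
      cases t1 with
      | nil =>
        by_cases h0 : c0 = '0'
        · by_cases h1 : c1 = 'o' ∨ c1 = 'O'
          · exfalso
            apply hD
            subst h0
            rcases h1 with rfl | rfl
            · exact Or.inl (String.toList_inj.mp (by rw [hl]; decide))
            · exact Or.inr (String.toList_inj.mp (by rw [hl]; decide))
          · simp [is_octint, is_octint_alt, hl, octLoop, h0, h1]
        · simp [is_octint, is_octint_alt, hl, octLoop, h0]
      | cons c2 t2 =>
        rw [alt_eq s c0 c1 (c2 :: t2) hl (by simp)]
        have hA : is_octint s = octLoop .q1 s.toList := by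
          unfold is_octint; rw [if_neg (by rw [hl]; simp)]
        rw [hA, hl]
        show (if c0 = '0' then octLoop .q2 (c1 :: c2 :: t2) else false) = _
        by_cases h0 : c0 = '0'
        · rw [if_pos h0]
          show (if c1 = 'o' ∨ c1 = 'O' then octLoop .q3 (c2 :: t2) else false) = _
          by_cases h1 : c1 = 'o' ∨ c1 = 'O'
          · rw [if_pos h1, (octLoop_char (c2 :: t2)).1]
            simp [h0, h1]
          · rw [if_neg h1]; simp [h1]
        · rw [if_neg h0]; simp [h0]
theorem is_octint_changed : Claim_changed_is_octint := by unfold Claim_changed_is_octint; decide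
theorem is_octint_tight : Claim_exact_is_octint := by
  intro s _ hD
  rcases hD with rfl | rfl <;> decide
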